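-- pv_equiv track=rewrite | github.com/dongjb741280/freeswitch-esl-python-sample | ai_call_center.py | _append_without_dup
-- ===== SOURCE A (Python) =====
-- def _append_without_dup(accumulated, new_text):
--     """将 new_text 以最长后缀重叠方式追加到 accumulated，避免重复与缺失。"""
--     if not accumulated:
--         return new_text
--     if not new_text:
--         return accumulated
--     if new_text in accumulated:
--         return accumulated
--     max_overlap = min(len(accumulated), len(new_text))
--     for k in range(max_overlap, 0, -1):
--         if accumulated.endswith(new_text[:k]):
--             return accumulated + new_text[k:]
--     return accumulated + new_text
-- ===== SOURCE B (Python) =====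
-- def _append_without_dup(accumulated, new_text):
--     """Single left-to-right scan of accumulated doing naive pattern matching of
--     new_text at each start position; a full match means new_text is already
--     contained, and the first match that runs to the end of accumulated gives the
--     longest suffix/prefix overlap (fuses A's `in` check and descending-k loop)."""
--     if not accumulated:
--         return new_text
--     if not new_text:
--         return accumulated
--     n, m = len(accumulated), len(new_text)
--     for i in range(n):
--         j = 0
--         while j < m and i + j < n and accumulated[i + j] == new_text[j]:
--             j += 1
--         if j == m:
--             return accumulated          # new_text already occurs in accumulated
--         if i + j == n:
--             return accumulated + new_text[j:]   # overlap of length n - i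
--     return accumulated + new_text
-- ===== Notes on version B (the rewrite author's own statement) =====
-- stated objective: alternative
-- what changed: A's substring test plus descending loop over prefix slices with endswith is replaced by a single left-to-right naive-matching scan over start positions of accumulated that fuses the containment check (full match) and the longest-overlap detection (first match reaching the end of accumulated).
import Mathlib
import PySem

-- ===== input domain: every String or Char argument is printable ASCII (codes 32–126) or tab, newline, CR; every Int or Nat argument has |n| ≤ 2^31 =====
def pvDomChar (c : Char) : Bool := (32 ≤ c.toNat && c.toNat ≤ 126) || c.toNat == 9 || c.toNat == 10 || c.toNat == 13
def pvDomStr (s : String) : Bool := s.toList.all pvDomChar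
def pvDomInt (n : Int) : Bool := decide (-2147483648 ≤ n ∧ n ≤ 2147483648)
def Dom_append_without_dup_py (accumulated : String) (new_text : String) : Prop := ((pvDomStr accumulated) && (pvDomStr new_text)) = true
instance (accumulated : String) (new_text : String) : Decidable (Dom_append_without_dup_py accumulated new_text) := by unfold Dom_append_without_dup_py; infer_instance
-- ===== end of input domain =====

-- B replaces A's substring test + descending endswith loop over prefix slices by one
-- left-to-right naive-matching scan of accumulated that fuses both checks (objective: alternative).

-- ===== PORT A =====
-- 'for k in range(max_overlap, 0, -1): if accumulated.endswith(new_text[:k]): return accumulated + new_text[k:]'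
-- as a descending structural recursion on k; new_text[:k] is t.take k and new_text[k:] is t.drop k
-- (exact for these nonnegative in-range bounds, cf. PySem.List.slice_to_natCast / slice_from_natCast)
def aOverlapLoop (a t : List Char) : Nat → List Char
  | 0 => a ++ t
  | k + 1 =>
    if PySem.Chars.endswith a (t.take (k + 1)) then a ++ t.drop (k + 1)
    else aOverlapLoop a t k

def append_without_dup_py (accumulated : String) (new_text : String) : String :=
  let a := accumulated.toList
  let t := new_text.toList
  if a = [] then new_text                                        -- if not accumulated
  else if t = [] then accumulated                                -- if not new_text
  else if PySem.Str.isIn new_text accumulated then accumulated   -- if new_text in accumulated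
  else String.ofList (aOverlapLoop a t (min a.length t.length))

-- ===== PORT B =====
-- inner 'while j < m and i + j < n and accumulated[i+j] == new_text[j]: j += 1',
-- run on the suffix rem = accumulated[i:] (so 'i + j < n' is the end of rem)
def lcpLen : List Char → List Char → Nat
  | x :: xs, y :: ys => if x = y then lcpLen xs ys + 1 else 0
  | _, _ => 0

-- outer 'for i in range(n)': the position i is carried as the suffix rem = accumulated[i:];
-- 'i + j == n' is 'j = rem.length', and falling off the end of the range is rem = []
def bScan (a t : List Char) : List Char → List Char
  | [] => a ++ t
  | rem@(_ :: rest) =>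
    let j := lcpLen rem t
    if j = t.length then a
    else if j = rem.length then a ++ t.drop j
    else bScan a t rest

def append_without_dup_py_alt (accumulated : String) (new_text : String) : String :=
  let a := accumulated.toList
  let t := new_text.toList
  if a = [] then new_text
  else if t = [] then accumulated
  else String.ofList (bScan a t a)

-- ===== PRECONDITION & SPEC =====
def Spec_append_without_dup_py (accumulated : String) (new_text : String) (out : String) : Prop := out = append_without_dup_py_alt accumulated new_text
instance (accumulated : String) (new_text : String) (out : String) : Decidable (Spec_append_without_dup_py accumulated new_text out) := by unfold Spec_append_without_dup_py; infer_instance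

-- ===== CLAIM (what is proved, stated in full; the proofs are below) =====
def Claim_equal_append_without_dup_py : Prop := ∀ (accumulated : String) (new_text : String), Dom_append_without_dup_py accumulated new_text → Spec_append_without_dup_py accumulated new_text (append_without_dup_py accumulated new_text)

-- ===== LEMMAS AND PROOFS =====

-- the canonical overlap length: the greatest k ≤ b with s.endswith(t[:k])
def ovG (s t : List Char) (b : Nat) : Nat :=
  Nat.findGreatest (fun k => PySem.Chars.endswith s (t.take k) = true) b

theorem lcpLen_le_left : ∀ s t : List Char, lcpLen s t ≤ s.length := by
  intro s
  induction s with
  | nil => intro t; cases t <;> simp [lcpLen]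
  | cons x xs ih =>
    intro t
    cases t with
    | nil => simp [lcpLen]
    | cons y ys =>
      simp only [lcpLen, List.length_cons]
      split_ifs with h
      · exact Nat.succ_le_succ (ih ys)
      · omega

theorem lcpLen_le_right : ∀ s t : List Char, lcpLen s t ≤ t.length := by
  intro s
  induction s with
  | nil => intro t; cases t <;> simp [lcpLen]
  | cons x xs ih =>
    intro t
    cases t with
    | nil => simp [lcpLen]
    | cons y ys =>
      simp only [lcpLen, List.length_cons]
      split_ifs with h
      · exact Nat.succ_le_succ (ih ys)
      · omega

theorem lcpLen_eq_right_iff : ∀ s t : List Char, (lcpLen s t = t.length ↔ t <+: s) := by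
  intro s
  induction s with
  | nil =>
    intro t; cases t with
    | nil => simp [lcpLen]
    | cons y ys => simp [lcpLen]
  | cons x xs ih =>
    intro t
    cases t with
    | nil => simp [lcpLen]
    | cons y ys =>
      simp only [lcpLen, List.length_cons, List.cons_prefix_cons]
      split_ifs with h
      · rw [Nat.succ_inj]
        constructor
        · intro hl; exact ⟨h.symm, (ih ys).mp hl⟩
        · intro ⟨_, hp⟩; exact (ih ys).mpr hp
      · constructor
        · intro hl; exact hl.elim
        · intro ⟨he, _⟩; exact absurd he.symm h

theorem lcpLen_eq_left_iff : ∀ s t : List Char, (lcpLen s t = s.length ↔ s <+: t) := by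
  intro s
  induction s with
  | nil => intro t; cases t <;> simp [lcpLen]
  | cons x xs ih =>
    intro t
    cases t with
    | nil => simp [lcpLen]
    | cons y ys =>
      simp only [lcpLen, List.length_cons, List.cons_prefix_cons]
      split_ifs with h
      · rw [Nat.succ_inj]
        constructor
        · intro hl; exact ⟨h, (ih ys).mp hl⟩
        · intro ⟨_, hp⟩; exact (ih ys).mpr hp
      · constructor
        · intro hl; exact hl.elim
        · intro ⟨he, _⟩; exact absurd he h

theorem fgCongr (P Q : Nat → Prop) [DecidablePred P] [DecidablePred Q] :
    ∀ b : Nat, (∀ k, k ≤ b → (P k ↔ Q k)) → Nat.findGreatest P b = Nat.findGreatest Q b := by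
  intro b
  induction b with
  | zero => intro _; rfl
  | succ n ih =>
    intro h
    rw [Nat.findGreatest_succ, Nat.findGreatest_succ]
    by_cases hp : P (n + 1)
    · rw [if_pos hp, if_pos ((h (n + 1) le_rfl).mp hp)]
    · rw [if_neg hp, if_neg (fun hq => hp ((h (n + 1) le_rfl).mpr hq))]
      exact ih (fun k hk => h k (Nat.le_succ_of_le hk))

theorem fgStable (P : Nat → Prop) [DecidablePred P] (b : Nat) :
    ∀ d : Nat, (∀ k, b < k → k ≤ b + d → ¬ P k) → Nat.findGreatest P (b + d) = Nat.findGreatest P b := by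
  intro d
  induction d with
  | zero => intro _; rfl
  | succ n ih =>
    intro h
    have hsplit : b + (n + 1) = (b + n) + 1 := by omega
    rw [hsplit, Nat.findGreatest_succ, if_neg (h (b + n + 1) (by omega) (by omega))]
    exact ih (fun k hk hk' => h k hk (by omega))

-- A's loop returns the greatest overlap k ≤ its starting bound (k = 0 meaning none)
theorem aLoop_eq (a t : List Char) : ∀ k : Nat, aOverlapLoop a t k = a ++ t.drop (ovG a t k) := by
  intro k
  induction k with
  | zero => simp [aOverlapLoop, ovG]
  | succ n ih =>
    rw [aOverlapLoop, ovG, Nat.findGreatest_succ]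
    by_cases hp : PySem.Chars.endswith a (t.take (n + 1)) = true
    · rw [if_pos hp, if_pos hp]
    · rw [if_neg hp, if_neg hp, ih, ovG]

-- B's scan of the suffix rem: full containment of t wins, else the first position whose
-- match runs to the end of rem is the greatest overlap among rem's positions
theorem bScan_eq (t : List Char) (ht : t ≠ []) :
    ∀ (a rem : List Char),
      bScan a t rem =
        if PySem.Chars.isIn t rem = true then a else a ++ t.drop (ovG rem t rem.length) := by
  intro a rem
  induction rem with
  | nil =>
    have hni : PySem.Chars.isIn t ([] : List Char) = false :=
      (PySem.Chars.isIn_eq_false_iff t []).mpr (fun hinf => ht (List.eq_nil_of_infix_nil hinf))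
    simp [bScan, hni, ovG]
  | cons x rest ih =>
    rw [bScan]
    simp only [List.length_cons]
    by_cases hjm : lcpLen (x :: rest) t = t.length
    · -- t is a prefix of x :: rest: contained
      have hpre : t <+: x :: rest := (lcpLen_eq_right_iff (x :: rest) t).mp hjm
      have hin : PySem.Chars.isIn t (x :: rest) = true :=
        (PySem.Chars.isIn_iff_infix t (x :: rest)).mpr hpre.isInfix
      simp [hjm, hin]
    · by_cases hjr : lcpLen (x :: rest) t = rest.length + 1
      · -- x :: rest is a proper prefix of t: overlap found at this position
        have hpre : x :: rest <+: t := by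
          apply (lcpLen_eq_left_iff (x :: rest) t).mp
          simpa using hjr
        have hlt : rest.length + 1 < t.length := by
          have := lcpLen_le_right (x :: rest) t
          omega
        have hnin : PySem.Chars.isIn t (x :: rest) = false :=
          (PySem.Chars.isIn_eq_false_iff t (x :: rest)).mpr (by
            intro hinf
            have := hinf.length_le
            simp at this
            omega)
        have htk : t.take (rest.length + 1) = x :: rest := by
          have := (List.prefix_iff_eq_take.mp hpre).symm
          simpa using this
        have hP : PySem.Chars.endswith (x :: rest) (t.take (rest.length + 1)) = true := by
          rw [htk]; exact (PySem.Chars.endswith_iff _ _).mpr List.suffix_rfl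
        have hov : ovG (x :: rest) t (rest.length + 1) = rest.length + 1 := by
          rw [ovG, Nat.findGreatest_succ, if_pos hP]
        simp [hjr, hnin, hov]
        omega
      · -- no hit at this position: step to the next suffix
        have hjl1 : lcpLen (x :: rest) t < t.length := by
          have := lcpLen_le_right (x :: rest) t; omega
        have hjl2 : lcpLen (x :: rest) t < rest.length + 1 := by
          have := lcpLen_le_left (x :: rest) t; simp at this; omega
        have hnpre : ¬ t <+: x :: rest := fun hp => hjm ((lcpLen_eq_right_iff (x :: rest) t).mpr hp)
        rw [if_neg hjm, if_neg hjr, ih]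
        by_cases hin : PySem.Chars.isIn t rest = true
        · have hin' : PySem.Chars.isIn t (x :: rest) = true :=
            (PySem.Chars.isIn_iff_infix t (x :: rest)).mpr
              (List.infix_cons_iff.mpr (Or.inr ((PySem.Chars.isIn_iff_infix t rest).mp hin)))
          rw [hin, hin']
          simp
        · have hninfr : ¬ t <:+: rest := fun h =>
            hin ((PySem.Chars.isIn_iff_infix t rest).mpr h)
          have hninf : ¬ t <:+: x :: rest := by
            intro h
            rcases List.infix_cons_iff.mp h with h1 | h2
            · exact hnpre h1
            · exact hninfr h2
          have hnin : PySem.Chars.isIn t (x :: rest) = false :=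
            (PySem.Chars.isIn_eq_false_iff t (x :: rest)).mpr hninf
          have hnin' : PySem.Chars.isIn t rest = false :=
            (PySem.Chars.isIn_eq_false_iff t rest).mpr hninfr
          rw [hnin', hnin]
          simp only [Bool.false_eq_true, if_false]
          -- the top position is no hit, so the greatest overlap is found in rest
          have hPtop : ¬ PySem.Chars.endswith (x :: rest) (t.take (rest.length + 1)) = true := by
            intro hP
            have hsuf : t.take (rest.length + 1) <:+ x :: rest := (PySem.Chars.endswith_iff _ _).mp hP
            by_cases hlen : rest.length + 1 ≤ t.length
            · have hlens : (t.take (rest.length + 1)).length = (x :: rest).length := by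
                simp [List.length_take]; omega
              have heq : t.take (rest.length + 1) = x :: rest :=
                List.IsSuffix.eq_of_length hsuf hlens
              apply hjr
              have := (lcpLen_eq_left_iff (x :: rest) t).mpr (List.prefix_iff_eq_take.mpr heq.symm)
              simpa using this
            · have heq : t.take (rest.length + 1) = t := List.take_of_length_le (by omega)
              rw [heq] at hsuf
              exact hninf hsuf.isInfix
          have hstep : ovG (x :: rest) t (rest.length + 1) = ovG (x :: rest) t rest.length := by
            rw [ovG, Nat.findGreatest_succ, if_neg hPtop]; rfl
          have hcong : ovG (x :: rest) t rest.length = ovG rest t rest.length := by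
            rw [ovG, ovG]
            apply fgCongr
            intro k hk
            constructor
            · intro h
              have hs := (PySem.Chars.endswith_iff _ _).mp h
              rcases List.suffix_cons_iff.mp hs with h1 | h1
              · exfalso
                have h2 : (t.take k).length ≤ k := by simp [List.length_take]
                have h3 : (t.take k).length = rest.length + 1 := by rw [h1]; simp
                omega
              · exact (PySem.Chars.endswith_iff _ _).mpr h1
            · intro h
              exact (PySem.Chars.endswith_iff _ _).mpr
                (((PySem.Chars.endswith_iff _ _).mp h).trans (List.suffix_cons x rest))
          rw [hstep, hcong]

-- past min(n, m) the overlap predicate is vacuous (t[:k] = t, and t is not contained)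
theorem ovG_min (a t : List Char) (hnin : ¬ t <:+: a) :
    ovG a t a.length = ovG a t (min a.length t.length) := by
  rw [ovG, ovG]
  set b := min a.length t.length with hbdef
  obtain ⟨d, hd⟩ : ∃ d, a.length = b + d := ⟨a.length - b, by omega⟩
  rw [hd]
  apply fgStable
  intro k hk1 hk2 hP
  have hsuf := (PySem.Chars.endswith_iff _ _).mp hP
  have htle : t.length ≤ k := by omega
  rw [List.take_of_length_le htle] at hsuf
  exact hnin hsuf.isInfix

-- ===== VERDICT (by name: the statement is the Claim_ definition above) =====
theorem append_without_dup_py_spec : Claim_equal_append_without_dup_py := by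
  unfold Claim_equal_append_without_dup_py Spec_append_without_dup_py
  intro accumulated new_text _
  unfold append_without_dup_py append_without_dup_py_alt
  by_cases ha : accumulated.toList = []
  · simp [ha]
  · by_cases htl : new_text.toList = []
    · simp [ha, htl]
    · simp only [ha, htl, if_false]
      by_cases hin : PySem.Chars.isIn new_text.toList accumulated.toList = true
      · rw [bScan_eq _ htl, if_pos hin]
        simp [hin, String.ofList_toList]
      · have hs : ¬ (PySem.Str.isIn new_text accumulated = true) := by
          simp [PySem.Str.isIn_eq]
          simpa using hin
        have hninf : ¬ new_text.toList <:+: accumulated.toList := by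
          intro h
          exact hin ((PySem.Chars.isIn_iff_infix _ _).mpr h)
        rw [bScan_eq _ htl, if_neg hin]
        simp only [hs, aLoop_eq]
        rw [ovG_min _ _ hninf]
        simp
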